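-- pv_equiv track=rewrite | github.com/shrisawant144/astro | kundali/utils.py | houses_are_consecutive
-- ===== SOURCE A (Python) =====
-- def houses_are_consecutive(house_set):
--     """Return True if the given set of house numbers (1-12) form a gapless consecutive sequence,
--     accounting for zodiac wrap-around."""
--     houses = sorted(house_set)
--     n = len(houses)
--     if n < 2:
--         return True
--     for start_i in range(n):
--         ok = True
--         for j in range(1, n):
--             diff = (houses[(start_i + j) % n] - houses[(start_i + j - 1) % n]) % 12
--             if diff != 1:
--                 ok = False
--                 break
--         if ok:
--             return True
--     return False
-- ===== SOURCE B (Python) =====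
-- def houses_are_consecutive(house_set):
--     """Return True if the given set of house numbers (1-12) form a gapless consecutive sequence,
--     accounting for zodiac wrap-around."""
--     h = sorted(house_set)
--     n = len(h)
--     if n < 2:
--         return True
--     gaps = [(h[(i + 1) % n] - h[i]) % 12 for i in range(n)]
--     return sum(1 for d in gaps if d != 1) <= 1
-- ===== Notes on version B (the rewrite author's own statement) =====
-- stated objective: faster
-- what changed: Replaced A's nested try-every-rotation search over the sorted list with a single pass that computes all n cyclic gaps mod 12 and returns whether at most one gap differs from 1.
import Mathlib
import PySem

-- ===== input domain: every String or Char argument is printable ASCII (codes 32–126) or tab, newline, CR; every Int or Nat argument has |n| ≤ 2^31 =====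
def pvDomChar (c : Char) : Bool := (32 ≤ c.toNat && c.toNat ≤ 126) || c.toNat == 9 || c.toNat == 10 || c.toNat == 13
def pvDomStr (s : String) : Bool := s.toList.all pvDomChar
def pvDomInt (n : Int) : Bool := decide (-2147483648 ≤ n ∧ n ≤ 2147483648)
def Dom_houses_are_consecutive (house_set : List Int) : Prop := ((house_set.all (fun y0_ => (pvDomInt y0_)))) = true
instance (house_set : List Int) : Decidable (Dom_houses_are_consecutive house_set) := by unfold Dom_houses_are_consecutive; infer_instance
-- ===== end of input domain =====

-- B replaces A's nested try-every-rotation scan with one linear pass counting cyclic gaps ≠ 1 (objective: simpler).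

-- ===== PORT A =====
-- inner 'for j in range(1, n)' loop with break; returns the final value of 'ok'
def pvAInner (houses : List Int) (n start_i : Int) : List Int → Bool
  | [] => true
  | j :: rest =>
    let diff := PySem.Int.mod
      (PySem.List.pyGetD houses (PySem.Int.mod (start_i + j) n) 0
        - PySem.List.pyGetD houses (PySem.Int.mod (start_i + j - 1) n) 0) 12
    if diff ≠ 1 then false else pvAInner houses n start_i rest

-- outer 'for start_i in range(n)' loop with early 'return True'
def pvAOuter (houses : List Int) (n : Int) : List Int → Bool
  | [] => false
  | s :: rest =>
    if pvAInner houses n s (PySem.List.pyRange 1 n 1) then true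
    else pvAOuter houses n rest

def houses_are_consecutive (house_set : List Int) : Bool :=
  let houses := PySem.List.sorted house_set (fun x => x) false
  let n : Int := houses.length
  if n < 2 then true
  else pvAOuter houses n (PySem.List.pyRange 0 n 1)

-- ===== PORT B =====
-- body of B's list comprehension: the i-th cyclic gap (h[(i+1)%n] - h[i]) % 12
def pvGap (h : List Int) (n i : Int) : Int :=
  PySem.Int.mod (PySem.List.pyGetD h (PySem.Int.mod (i + 1) n) 0 - PySem.List.pyGetD h i 0) 12

def houses_are_consecutive_alt (house_set : List Int) : Bool :=
  let h := PySem.List.sorted house_set (fun x => x) false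
  let n : Int := h.length
  if n < 2 then true
  else
    let gaps := (PySem.List.pyRange 0 n 1).map (pvGap h n)
    decide ((gaps.filter (fun d => !(d == 1))).length ≤ 1)

-- ===== PRECONDITION & SPEC =====
def Spec_houses_are_consecutive (house_set : List Int) (out : Bool) : Prop := out = houses_are_consecutive_alt house_set
instance (house_set : List Int) (out : Bool) : Decidable (Spec_houses_are_consecutive house_set out) := by unfold Spec_houses_are_consecutive; infer_instance

-- ===== CLAIM (what is proved, stated in full; the proofs are below) =====
def Claim_equal_houses_are_consecutive : Prop := ∀ (house_set : List Int), Dom_houses_are_consecutive house_set → Spec_houses_are_consecutive house_set (houses_are_consecutive house_set)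

-- ===== LEMMAS AND PROOFS =====

-- Python '%' with positive divisor is Int.emod; for 0 ≤ a < 2n it is an if-then-else.
lemma modIf (a n : Int) (_hn : 0 < n) (h0 : 0 ≤ a) (h2 : a < 2 * n) :
    a % n = if a < n then a else a - n := by
  split
  · exact Int.emod_eq_of_lt h0 (by assumption)
  · rw [← Int.sub_emod_right a n]
    exact Int.emod_eq_of_lt (by omega) (by omega)

lemma pvAInner_iff (h : List Int) (n s : Int) (l : List Int) :
    pvAInner h n s l = true ↔
      ∀ j ∈ l, PySem.Int.mod
        (PySem.List.pyGetD h (PySem.Int.mod (s + j) n) 0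
          - PySem.List.pyGetD h (PySem.Int.mod (s + j - 1) n) 0) 12 = 1 := by
  induction l with
  | nil => simp [pvAInner]
  | cons j rest ih =>
    simp only [pvAInner]
    split_ifs with hd
    · simp only [false_iff]
      intro hall
      exact hd (hall j List.mem_cons_self)
    · rw [ih]
      constructor
      · rintro hall k hk
        rcases List.mem_cons.mp hk with rfl | hk'
        · exact not_not.mp hd
        · exact hall k hk'
      · intro hall k hk
        exact hall k (List.mem_cons_of_mem _ hk)

lemma pvAOuter_iff (h : List Int) (n : Int) (l : List Int) :
    pvAOuter h n l = true ↔ ∃ s ∈ l, pvAInner h n s (PySem.List.pyRange 1 n 1) = true := by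
  induction l with
  | nil => simp [pvAOuter]
  | cons s rest ih =>
    simp only [pvAOuter]
    split
    · simp only [true_iff]
      exact ⟨s, List.mem_cons_self, by assumption⟩
    · rw [ih]
      constructor
      · rintro ⟨t, ht, hti⟩
        exact ⟨t, List.mem_cons_of_mem _ ht, hti⟩
      · rintro ⟨t, ht, hti⟩
        rcases List.mem_cons.mp ht with rfl | ht'
        · exact absurd hti (by assumption)
        · exact ⟨t, ht', hti⟩

-- A's inner-loop body at (s, j) is B's gap at index (s + j - 1) % n.
lemma diff_eq_gap (h : List Int) (n s j : Int) (hn : 0 < n) :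
    PySem.Int.mod
      (PySem.List.pyGetD h (PySem.Int.mod (s + j) n) 0
        - PySem.List.pyGetD h (PySem.Int.mod (s + j - 1) n) 0) 12
      = pvGap h n ((s + j - 1) % n) := by
  unfold pvGap
  simp only [PySem.Int.mod_eq_emod_of_pos hn]
  rw [Int.emod_add_emod, show s + j - 1 + 1 = s + j by ring]

-- Nodup list all of whose elements equal c has at most one element.
lemma nodup_all_eq_length_le_one {α : Type} (l : List α) (c : α)
    (hnd : l.Nodup) (hall : ∀ x ∈ l, x = c) : l.length ≤ 1 := by
  match l with
  | [] => simp
  | [a] => simp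
  | a :: b :: t =>
    exfalso
    have ha := hall a (by simp)
    have hb := hall b (by simp)
    subst ha
    rw [hb] at hnd
    simp at hnd

-- The rotation starting at s visits exactly the gaps at every index except (s + n - 1) % n.
lemma rotation_iff (h : List Int) (n s : Int) (hn : 0 < n) (hs0 : 0 ≤ s) (hsn : s < n) :
    (∀ j, 1 ≤ j → j < n → pvGap h n ((s + j - 1) % n) = 1) ↔
      (∀ k, 0 ≤ k → k < n → k ≠ (s + n - 1) % n → pvGap h n k = 1) := by
  have hk0 : (s + n - 1) % n = if s = 0 then n - 1 else s - 1 := by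
    rw [modIf _ n hn (by omega) (by omega)]
    split_ifs <;> omega
  constructor
  · intro hall k hk0' hkn hne
    rw [hk0] at hne
    by_cases hle : s ≤ k
    · have hj := hall (k - s + 1) (by omega) (by split_ifs at hne <;> omega)
      rwa [show s + (k - s + 1) - 1 = k by ring, Int.emod_eq_of_lt hk0' hkn] at hj
    · have hj := hall (k - s + 1 + n) (by omega) (by split_ifs at hne <;> omega)
      rwa [show s + (k - s + 1 + n) - 1 = k + n by ring,
        modIf _ n hn (by omega) (by omega), if_neg (by omega),
        show k + n - n = k by ring] at hj
  · intro hall j hj1 hjn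
    have hb : 0 ≤ (s + j - 1) % n := Int.emod_nonneg _ (by omega)
    have hb' : (s + j - 1) % n < n := Int.emod_lt_of_pos _ hn
    refine hall _ hb hb' ?_
    rw [hk0, modIf _ n hn (by omega) (by omega)]
    split_ifs <;> omega

-- Membership in the list of bad gap indices.
lemma bad_filter_mem (h : List Int) (n k : Int) :
    k ∈ (PySem.List.pyRange 0 n 1).filter (fun i => !(pvGap h n i == 1)) ↔
      (0 ≤ k ∧ k < n) ∧ pvGap h n k ≠ 1 := by
  simp [List.mem_filter, PySem.List.mem_pyRange_one]

lemma main_iff (h : List Int) (n : Int) (hn : 0 < n) :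
    (pvAOuter h n (PySem.List.pyRange 0 n 1) = true) ↔
      ((PySem.List.pyRange 0 n 1).filter (fun i => !(pvGap h n i == 1))).length ≤ 1 := by
  rw [pvAOuter_iff]
  constructor
  · rintro ⟨s, hs, hinner⟩
    rw [PySem.List.mem_pyRange_one] at hs
    rw [pvAInner_iff] at hinner
    have hrot := (rotation_iff h n s hn hs.1 hs.2).mp (fun j hj1 hjn => by
      have hx := hinner j (by rw [PySem.List.mem_pyRange_one]; exact ⟨hj1, hjn⟩)
      rwa [diff_eq_gap h n s j hn] at hx)
    refine nodup_all_eq_length_le_one _ ((s + n - 1) % n)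
      (List.Nodup.filter _ (PySem.List.nodup_pyRange_one 0 n)) ?_
    intro k hk
    rw [bad_filter_mem] at hk
    by_contra hne
    exact hk.2 (hrot k hk.1.1 hk.1.2 hne)
  · intro hlen
    rcases hb : (PySem.List.pyRange 0 n 1).filter (fun i => !(pvGap h n i == 1)) with - | ⟨k0, rest⟩
    · -- no bad gap: start 0 works
      have hgood : ∀ k, 0 ≤ k → k < n → pvGap h n k = 1 := by
        intro k h0 h1
        by_contra hne
        have hkmem := (bad_filter_mem h n k).mpr ⟨⟨h0, h1⟩, hne⟩
        rw [hb] at hkmem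
        simp at hkmem
      refine ⟨0, ?_, ?_⟩
      · rw [PySem.List.mem_pyRange_one]; omega
      · rw [pvAInner_iff]
        intro j hj
        rw [PySem.List.mem_pyRange_one] at hj
        rw [diff_eq_gap h n 0 j hn, show (0:Int) + j - 1 = j - 1 by ring,
          Int.emod_eq_of_lt (by omega) (by omega)]
        exact hgood (j - 1) (by omega) (by omega)
    · -- exactly one bad gap k0: start just after it
      rw [hb] at hlen
      have hr : rest = [] := by
        have := List.length_cons (a := k0) (as := rest) ▸ hlen
        exact List.eq_nil_of_length_eq_zero (by omega)
      subst hr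
      have hk0mem : k0 ∈ (PySem.List.pyRange 0 n 1).filter (fun i => !(pvGap h n i == 1)) := by
        rw [hb]; simp
      rw [bad_filter_mem] at hk0mem
      have honly : ∀ k, 0 ≤ k → k < n → k ≠ k0 → pvGap h n k = 1 := by
        intro k h0 h1 hne
        by_contra hbadk
        have hkmem := (bad_filter_mem h n k).mpr ⟨⟨h0, h1⟩, hbadk⟩
        rw [hb] at hkmem
        simp at hkmem
        exact hne hkmem
      have hsval : (k0 + 1) % n = if k0 + 1 < n then k0 + 1 else 0 := by
        rw [modIf _ n hn (by omega) (by omega)]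
        split_ifs <;> omega
      refine ⟨(k0 + 1) % n, ?_, ?_⟩
      · rw [PySem.List.mem_pyRange_one, hsval]
        split_ifs <;> omega
      · rw [pvAInner_iff]
        intro j hj
        rw [PySem.List.mem_pyRange_one] at hj
        rw [diff_eq_gap h n ((k0 + 1) % n) j hn]
        have hm0 : 0 ≤ ((k0 + 1) % n + j - 1) % n := Int.emod_nonneg _ (by omega)
        have hm1 : ((k0 + 1) % n + j - 1) % n < n := Int.emod_lt_of_pos _ hn
        refine honly _ hm0 hm1 ?_
        rw [hsval]
        rw [hsval] at hm0 hm1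
        split_ifs with hcase
        · rw [modIf _ n hn (by omega) (by omega)]
          split_ifs <;> omega
        · rw [modIf _ n hn (by omega) (by omega)]
          split_ifs <;> omega

-- ===== VERDICT (by name: the statement is the Claim_ definition above) =====
theorem houses_are_consecutive_spec : Claim_equal_houses_are_consecutive := by
  intro house_set _
  unfold Spec_houses_are_consecutive houses_are_consecutive houses_are_consecutive_alt
  simp only []
  by_cases hlt : ((PySem.List.sorted house_set (fun x => x) false).length : Int) < 2
  · rw [if_pos hlt, if_pos hlt]
  · rw [if_neg hlt, if_neg hlt, List.filter_map, List.length_map]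
    have hn0 : 0 < ((PySem.List.sorted house_set (fun x => x) false).length : Int) := by omega
    rw [Bool.eq_iff_iff, decide_eq_true_iff]
    simp only [Function.comp_def]
    exact main_iff _ _ hn0
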